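-- pv_equiv track=rewrite | github.com/Raumberg/myllm | src/utils/arrays/array_utils.py | filter_indices
-- ===== SOURCE A (Python) =====
-- from typing import List
--
-- def filter_indices(a: List[int], b: List[int]) -> List[int]:
--     """
--     Filters elements from list `b` based on the values in list `a`.
--
--     For each element in `a`, this function finds the next element in `b`
--     that is greater than the current element in `a` and appends it to
--     the result list. The function ensures that each element from `b`
--     is only used once.
--
--     Args:
--         a (List[int]): A list of integers to filter against.
--         b (List[int]): A list of integers from which to filter elements.
--
--     Returns:
--         List[int]: A list of filtered elements from `b` that are greater
--                     than the corresponding elements in `a`.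
--     """
--     filtered_b = []
--     a_len = len(a)
--     b_len = len(b)
--
--     j = 0  # Pointer for list b
--
--     for i in range(a_len):
--         while j < b_len and b[j] <= a[i]:
--             j += 1
--         if j < b_len:
--             filtered_b.append(b[j])
--             j += 1
--
--     return filtered_b
-- ===== SOURCE B (Python) =====
-- from typing import List
--
-- def filter_indices(a: List[int], b: List[int]) -> List[int]:
--     # Divide-and-conquer over b: solve each half recursively, threading the
--     # index into a from the left half into the right half, then concatenate.
--     a_len = len(a)
--
--     def go(lo: int, hi: int, i: int):
--         # returns (selected elements of b[lo:hi], updated index into a)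
--         if hi - lo == 1:
--             x = b[lo]
--             if i < a_len and x > a[i]:
--                 return [x], i + 1
--             return [], i
--         mid = (lo + hi) // 2
--         left, i = go(lo, mid, i)
--         right, i = go(mid, hi, i)
--         return left + right, i
--
--     if not b:
--         return []
--     return go(0, len(b), 0)[0]
-- ===== Notes on version B (the rewrite author's own statement) =====
-- stated objective: alternative
-- what changed: B solves the problem by divide-and-conquer recursion on halves of b (threading the a-index from the left half into the right half and concatenating the partial results), instead of A's iterative two-pointer scan.
import Mathlib
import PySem

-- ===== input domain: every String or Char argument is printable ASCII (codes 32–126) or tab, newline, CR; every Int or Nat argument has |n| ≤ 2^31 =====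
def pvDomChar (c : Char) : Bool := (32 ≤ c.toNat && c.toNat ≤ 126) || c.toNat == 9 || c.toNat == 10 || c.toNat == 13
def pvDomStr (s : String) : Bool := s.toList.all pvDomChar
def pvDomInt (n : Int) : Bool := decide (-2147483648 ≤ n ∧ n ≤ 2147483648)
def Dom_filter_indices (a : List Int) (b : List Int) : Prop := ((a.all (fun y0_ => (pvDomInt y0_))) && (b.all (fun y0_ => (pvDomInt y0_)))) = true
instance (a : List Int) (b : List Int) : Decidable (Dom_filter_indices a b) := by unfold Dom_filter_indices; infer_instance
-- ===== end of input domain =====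

-- B replaces A's iterative two-pointer scan by divide-and-conquer recursion on halves
-- of b, threading the a-index left-to-right; an alternative decomposition, same output.

-- ===== PORT A =====
-- the inner `while j < b_len and b[j] <= a[i]: j += 1` loop of A
def pvWhileSkip (b : List Int) (ai : Int) (j : Nat) : Nat :=
  if _h : j < b.length then
    if b.getD j 0 ≤ ai then pvWhileSkip b ai (j + 1) else j
  else j
termination_by b.length - j

def filter_indices (a : List Int) (b : List Int) : List Int :=
  (a.foldl
    (fun (s : Nat × List Int) ai =>
      let j := pvWhileSkip b ai s.1
      if j < b.length then (j + 1, s.2 ++ [b.getD j 0]) else (j, s.2))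
    ((0 : Nat), ([] : List Int))).2

-- ===== PORT B =====
-- `go(lo, hi, i)` of Source B; the final `else ([], i)` branch is a totality guard only
-- (Python never calls go with hi ≤ lo + 1 unless hi - lo == 1).
def pvGo (a b : List Int) (lo hi : Nat) (i : Nat) : List Int × Nat :=
  if hi - lo = 1 then
    let x := b.getD lo 0
    if i < a.length ∧ a.getD i 0 < x then ([x], i + 1) else ([], i)
  else if h : lo + 1 < hi then
    let mid := (lo + hi) / 2
    let l := pvGo a b lo mid i
    let r := pvGo a b mid hi l.2
    (l.1 ++ r.1, r.2)
  else ([], i)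
termination_by hi - lo
decreasing_by all_goals omega

def filter_indices_alt (a : List Int) (b : List Int) : List Int :=
  if b = [] then [] else (pvGo a b 0 b.length 0).1

-- ===== PRECONDITION & SPEC =====
def Spec_filter_indices (a : List Int) (b : List Int) (out : List Int) : Prop := out = filter_indices_alt a b
instance (a : List Int) (b : List Int) (out : List Int) : Decidable (Spec_filter_indices a b out) := by unfold Spec_filter_indices; infer_instance

-- ===== CLAIM (what is proved, stated in full; the proofs are below) =====
def Claim_equal_filter_indices : Prop := ∀ (a : List Int) (b : List Int), Dom_filter_indices a b → Spec_filter_indices a b (filter_indices a b)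

-- ===== LEMMAS AND PROOFS =====

-- common reference function: merge-style recursion on b
def pvMerge : List Int → List Int → List Int
  | _, [] => []
  | [], _ :: _ => []
  | ai :: a', x :: b' => if ai < x then x :: pvMerge a' b' else pvMerge (ai :: a') b'
termination_by _ b => b.length

theorem pvMerge_nil_left (bl : List Int) : pvMerge [] bl = [] := by
  cases bl <;> simp [pvMerge]

theorem pvMerge_nil_right (al : List Int) : pvMerge al [] = [] := by
  cases al <;> simp [pvMerge]

theorem pvMerge_cons_dropWhile (ai : Int) (a' : List Int) (bl : List Int) :
    pvMerge (ai :: a') bl =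
      match bl.dropWhile (fun x => decide (x ≤ ai)) with
      | [] => []
      | y :: rest => y :: pvMerge a' rest := by
  induction bl with
  | nil => simp [pvMerge]
  | cons x b' ih =>
    by_cases h : x ≤ ai
    · have : ¬ ai < x := not_lt.mpr h
      simp [pvMerge, this, List.dropWhile, h, ih]
    · have h' : ai < x := lt_of_not_ge h
      simp [pvMerge, h', List.dropWhile, h]

theorem pvWhileSkip_spec (b : List Int) (ai : Int) (j : Nat) (hj : j ≤ b.length) :
    pvWhileSkip b ai j ≤ b.length ∧
      b.drop (pvWhileSkip b ai j) = (b.drop j).dropWhile (fun x => decide (x ≤ ai)) := by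
  fun_induction pvWhileSkip b ai j with
  | case1 j h hle ih =>
    have hd : b.drop j = b[j] :: b.drop (j + 1) := List.drop_eq_getElem_cons h
    have hg : b.getD j 0 = b[j] := List.getD_eq_getElem b 0 h
    rw [hd]
    have := ih (by omega)
    simpa [List.dropWhile, hg ▸ hle] using this
  | case2 j h hle =>
    have hd : b.drop j = b[j] :: b.drop (j + 1) := List.drop_eq_getElem_cons h
    have hg : b.getD j 0 = b[j] := List.getD_eq_getElem b 0 h
    rw [hd]
    constructor
    · omega
    · simp [List.dropWhile, show ¬ b[j] ≤ ai from hg ▸ hle]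
  | case3 j h =>
    have : j = b.length := by omega
    subst this
    simp

-- A's loop builds acc ++ pvMerge a (b.drop j)
theorem a_foldl (b : List Int) (al : List Int) :
    ∀ (j : Nat) (acc : List Int), j ≤ b.length →
      (al.foldl
        (fun (s : Nat × List Int) ai =>
          let j := pvWhileSkip b ai s.1
          if j < b.length then (j + 1, s.2 ++ [b.getD j 0]) else (j, s.2))
        (j, acc)).2 = acc ++ pvMerge al (b.drop j) := by
  induction al with
  | nil => intro j acc hj; simp [pvMerge_nil_left]
  | cons ai a' ih =>
    intro j acc hj
    obtain ⟨hle, hdrop⟩ := pvWhileSkip_spec b ai j hj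
    set j' := pvWhileSkip b ai j with hj'
    rw [pvMerge_cons_dropWhile, ← hdrop]
    by_cases h : j' < b.length
    · have hd : b.drop j' = b[j'] :: b.drop (j' + 1) := List.drop_eq_getElem_cons h
      have hg : b.getD j' 0 = b[j'] := List.getD_eq_getElem b 0 h
      simp only [List.foldl_cons, ← hj', if_pos h]
      rw [ih (j' + 1) (acc ++ [b.getD j' 0]) (by omega), hd, hg]
      simp
    · have hd : b.drop j' = [] := List.drop_eq_nil_of_le (by omega)
      simp only [List.foldl_cons, ← hj', if_neg h]
      rw [ih j' acc hle, hd]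
      simp [pvMerge_nil_right]

-- reference flat pass for B's side
def pvStep (a : List Int) (s : List Int × Nat) (x : Int) : List Int × Nat :=
  if s.2 < a.length ∧ a.getD s.2 0 < x then (s.1 ++ [x], s.2 + 1) else s

theorem pvStep_foldl_acc (a : List Int) (bl : List Int) :
    ∀ (i : Nat) (acc : List Int),
      bl.foldl (pvStep a) (acc, i) =
        (acc ++ (bl.foldl (pvStep a) ([], i)).1, (bl.foldl (pvStep a) ([], i)).2) := by
  induction bl with
  | nil => intro i acc; simp
  | cons x b' ih =>
    intro i acc
    simp only [List.foldl_cons]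
    by_cases h : i < a.length ∧ a.getD i 0 < x
    · rw [show pvStep a (acc, i) x = (acc ++ [x], i + 1) by simp only [pvStep]; rw [if_pos h],
          show pvStep a ([], i) x = ([x], i + 1) by simp only [pvStep]; rw [if_pos h]; simp,
          ih (i + 1) (acc ++ [x]), ih (i + 1) [x]]
      simp
    · rw [show pvStep a (acc, i) x = (acc, i) by simp only [pvStep]; rw [if_neg h],
          show pvStep a ([], i) x = ([], i) by simp only [pvStep]; rw [if_neg h]]
      exact ih i acc

-- the flat pass computes pvMerge
theorem pvStep_foldl_merge (a : List Int) (bl : List Int) :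
    ∀ (i : Nat), (bl.foldl (pvStep a) ([], i)).1 = pvMerge (a.drop i) bl := by
  induction bl with
  | nil => intro i; simp [pvMerge_nil_right]
  | cons x b' ih =>
    intro i
    simp only [List.foldl_cons]
    by_cases hi : i < a.length
    · have hd : a.drop i = a[i] :: a.drop (i + 1) := List.drop_eq_getElem_cons hi
      have hg : a.getD i 0 = a[i] := List.getD_eq_getElem a 0 hi
      by_cases hx : a.getD i 0 < x
      · rw [show pvStep a ([], i) x = ([x], i + 1) by
              simp only [pvStep]; rw [if_pos ⟨hi, hx⟩]; simp,
            pvStep_foldl_acc a b' (i + 1) [x], hd]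
        simp only [pvMerge]
        rw [if_pos (hg ▸ hx)]
        simp [ih (i + 1)]
      · rw [show pvStep a ([], i) x = ([], i) by
              simp only [pvStep]; rw [if_neg (by tauto)], ih i, hd]
        simp only [pvMerge]
        rw [if_neg (hg ▸ hx)]
    · have hd : a.drop i = [] := List.drop_eq_nil_of_le (by omega)
      rw [show pvStep a ([], i) x = ([], i) by
            simp only [pvStep]; rw [if_neg (by tauto)], ih i, hd]
      simp [pvMerge_nil_left]

-- pvGo on a segment equals the flat pass over that segment
theorem pvGo_eq_foldl (a b : List Int) :
    ∀ (lo hi i : Nat), lo < hi → hi ≤ b.length →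
      pvGo a b lo hi i = ((b.drop lo).take (hi - lo)).foldl (pvStep a) ([], i) := by
  intro lo hi
  induction hn : hi - lo using Nat.strong_induction_on generalizing lo hi with
  | _ n ih =>
    intro i hlt hhi
    subst hn
    by_cases h1 : hi - lo = 1
    · have hlo : lo < b.length := by omega
      have hd : b.drop lo = b[lo] :: b.drop (lo + 1) := List.drop_eq_getElem_cons hlo
      rw [pvGo, if_pos h1]
      dsimp only
      rw [h1, hd]
      simp only [List.take_succ_cons, List.take_zero, List.foldl_cons, List.foldl_nil]
      have hg : b.getD lo 0 = b[lo] := List.getD_eq_getElem b 0 hlo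
      rw [hg]
      by_cases hc : i < a.length ∧ a.getD i 0 < b[lo]
      · rw [if_pos hc]
        simp only [pvStep]
        rw [if_pos hc]
        simp
      · rw [if_neg hc]
        simp only [pvStep]
        rw [if_neg hc]
    · have h2 : lo + 1 < hi := by omega
      rw [pvGo, if_neg h1, dif_pos h2]
      dsimp only
      set mid := (lo + hi) / 2 with hmid
      have hmlo : lo < mid := by omega
      have hmhi : mid < hi := by omega
      have e1 := ih (mid - lo) (by omega) lo mid rfl i hmlo (by omega)
      rw [e1]
      set l := ((b.drop lo).take (mid - lo)).foldl (pvStep a) ([], i) with hl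
      have e2 := ih (hi - mid) (by omega) mid hi rfl l.2 hmhi hhi
      rw [e2]
      have hsplit : (b.drop lo).take (hi - lo) =
          (b.drop lo).take (mid - lo) ++ ((b.drop mid).take (hi - mid)) := by
        have : hi - lo = (mid - lo) + (hi - mid) := by omega
        rw [this, List.take_add, List.drop_drop]
        congr 3
        omega
      rw [hsplit, List.foldl_append, ← hl,
          pvStep_foldl_acc a ((b.drop mid).take (hi - mid)) l.2 l.1]

-- ===== VERDICT (by name: the statement is the Claim_ definition above) =====
theorem filter_indices_spec : Claim_equal_filter_indices := by
  intro a b _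
  unfold Spec_filter_indices filter_indices filter_indices_alt
  rw [a_foldl b a 0 [] (Nat.zero_le _)]
  by_cases hb : b = []
  · subst hb; simp [pvMerge_nil_right]
  · have hlen : 0 < b.length := List.length_pos_iff.mpr hb
    rw [if_neg hb, pvGo_eq_foldl a b 0 b.length 0 hlen le_rfl]
    simp [pvStep_foldl_merge a b 0]
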